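-- pv_equiv track=rewrite | github.com/cxy-com/VRlab | node_assigner.py | _is_pure_parallel_by_paths
-- ===== SOURCE A (Python) =====
-- from typing import Dict, List, Tuple, Optional, Set, Any
--
-- def _is_pure_parallel_by_paths(paths: List[List[str]],
--                                start: str, end: str) -> bool:
--     """
--     通过路径判断是否为纯并联
--
--     纯并联特征:
--     - 所有路径长度相同（都是3：电源->电阻->接地）
--     - 路径之间除了起点和终点外没有公共节点
--     """
--     if len(paths) < 2:
--         return False
--
--     # 检查所有路径长度是否相同
--     path_lengths = [len(p) for p in paths]
--     if len(set(path_lengths)) != 1: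
--         return False
--
--     # 检查路径长度是否为3（电源->元件->接地）
--     if path_lengths[0] != 3:
--         return False
--
--     # 检查路径之间是否没有公共中间节点
--     for i, path1 in enumerate(paths):
--         for path2 in paths[i+1:]:
--             # 获取中间节点（排除起点和终点）
--             middle1 = set(path1[1:-1])
--             middle2 = set(path2[1:-1])
--             if middle1 & middle2:  # 有交集
--                 return False
--
--     return True
-- ===== SOURCE B (Python) =====
-- from typing import List
--
-- def _is_pure_parallel_by_paths(paths: List[List[str]],
--                                start: str, end: str) -> bool:
--     if len(paths) < 2:
--         return False
--     # all paths must have length 3 (source -> component -> ground)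
--     if any(len(p) != 3 for p in paths):
--         return False
--     # pure parallel iff every path's single middle node is distinct
--     middles = [p[1] for p in paths]
--     return len(set(middles)) == len(middles)
-- ===== Notes on version B (the rewrite author's own statement) =====
-- stated objective: simpler
-- what changed: Replaces the nested pairwise middle-set intersection scan with one pass that collects each length-3 path's single middle node and compares len(set(middles)) to len(middles).
import Mathlib
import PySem

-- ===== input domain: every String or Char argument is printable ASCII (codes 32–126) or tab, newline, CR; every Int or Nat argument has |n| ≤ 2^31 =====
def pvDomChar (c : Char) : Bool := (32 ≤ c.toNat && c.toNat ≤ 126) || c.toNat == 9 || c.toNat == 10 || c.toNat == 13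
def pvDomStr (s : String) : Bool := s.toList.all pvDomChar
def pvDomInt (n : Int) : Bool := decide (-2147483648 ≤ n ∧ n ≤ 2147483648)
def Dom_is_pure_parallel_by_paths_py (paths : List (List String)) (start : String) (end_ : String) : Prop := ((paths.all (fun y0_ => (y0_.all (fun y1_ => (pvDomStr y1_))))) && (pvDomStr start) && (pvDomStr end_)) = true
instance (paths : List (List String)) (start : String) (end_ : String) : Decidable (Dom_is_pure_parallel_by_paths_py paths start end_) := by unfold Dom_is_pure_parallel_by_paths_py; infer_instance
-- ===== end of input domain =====

-- B replaces A's nested pairwise middle-set intersection scan with a single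
-- pass collecting each length-3 path's middle node and a distinctness check
-- (len(set(middles)) == len(middles)); objective: simpler.


-- ===== PORT A =====
-- middle1 = set(path1[1:-1]); middle2 = set(path2[1:-1]); 'if middle1 & middle2' is a nonemptiness test
def pvCommonMiddle (p q : List String) : Bool :=
  !(PySem.Set.inter (PySem.Set.ofList (PySem.List.slice p (some 1) (some (-1))))
                    (PySem.Set.ofList (PySem.List.slice q (some 1) (some (-1))))).isEmpty

-- 'for i, path1 in enumerate(paths): for path2 in paths[i+1:]: … return False' as tail recursion
def pvPairCheck : List (List String) → Bool
  | [] => true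
  | p :: rest => if rest.any (fun q => pvCommonMiddle p q) then false else pvPairCheck rest

def is_pure_parallel_by_paths_py (paths : List (List String)) (start : String) (end_ : String) : Bool :=
  if paths.length < 2 then false
  else
    let path_lengths := paths.map (fun p => PySem.List.len p)
    if (PySem.Set.ofList path_lengths).length ≠ 1 then false
    else if PySem.List.pyGetD path_lengths 0 0 ≠ 3 then false
    else pvPairCheck paths

-- ===== PORT B =====
def is_pure_parallel_by_paths_py_alt (paths : List (List String)) (start : String) (end_ : String) : Bool :=
  if paths.length < 2 then false
  else if paths.any (fun p => PySem.List.len p ≠ 3) then false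
  else
    -- p[1] is in range: the guard above ensures every path has length 3
    let middles := paths.map (fun p => PySem.List.pyGetD p 1 "")
    (PySem.Set.ofList middles).length == middles.length

-- ===== PRECONDITION & SPEC =====
def Spec_is_pure_parallel_by_paths_py (paths : List (List String)) (start : String) (end_ : String) (out : Bool) : Prop := out = is_pure_parallel_by_paths_py_alt paths start end_
instance (paths : List (List String)) (start : String) (end_ : String) (out : Bool) : Decidable (Spec_is_pure_parallel_by_paths_py paths start end_ out) := by unfold Spec_is_pure_parallel_by_paths_py; infer_instance

-- ===== CLAIM (what is proved, stated in full; the proofs are below) =====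
def Claim_equal_is_pure_parallel_by_paths_py : Prop := ∀ (paths : List (List String)) (start : String) (end_ : String), Dom_is_pure_parallel_by_paths_py paths start end_ → Spec_is_pure_parallel_by_paths_py paths start end_ (is_pure_parallel_by_paths_py paths start end_)

-- ===== LEMMAS AND PROOFS =====

-- Set.ofList of a duplicate-free list is the list itself (generalized over the accumulator)
theorem pvFoldlAdd_of_nodup {α : Type} [BEq α] [LawfulBEq α] (l : List α) :
    ∀ s : List α, (s ++ l).Nodup → List.foldl PySem.Set.add s l = s ++ l := by
  induction l with
  | nil => intro s _; simp
  | cons x t ih =>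
    intro s h
    have h' : ((s ++ [x]) ++ t).Nodup := by rwa [List.append_cons] at h
    have hx : x ∉ s := by
      have hsx : (s ++ [x]).Nodup := (List.nodup_append.mp h').1
      intro hm
      exact ((List.nodup_append.mp hsx).2.2 x hm x (by simp)) rfl
    have hadd : PySem.Set.add s x = s ++ [x] := by
      simp [PySem.Set.add, PySem.Set.contains]
      intro hc; exact absurd hc hx
    rw [List.foldl_cons, hadd, ih _ h']
    simp

theorem pv_ofList_len_iff {α : Type} [BEq α] [LawfulBEq α] (l : List α) :
    ((PySem.Set.ofList l).length = l.length) ↔ l.Nodup := by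
  constructor
  · intro hlen
    have hsub : (PySem.Set.ofList l).Subperm l :=
      List.Nodup.subperm (PySem.Set.nodup_ofList l) (fun x hx => (PySem.Set.mem_ofList l x).mp hx)
    have hperm := hsub.perm_of_length_le (by omega)
    exact hperm.nodup_iff.mp (PySem.Set.nodup_ofList l)
  · intro hnd
    have : PySem.Set.ofList l = l := by
      have := pvFoldlAdd_of_nodup l [] (by simpa using hnd)
      simpa [PySem.Set.ofList, PySem.Set.empty] using this
    rw [this]

-- on length-3 paths, a common middle is exactly equality of the single middle nodes
theorem pvCommonMiddle_eq (p q : List String) (hp : p.length = 3) (hq : q.length = 3) :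
    pvCommonMiddle p q = (PySem.List.pyGetD p 1 "" == PySem.List.pyGetD q 1 "") := by
  match p, hp with
  | [a, b, c], _ =>
    match q, hq with
    | [d, e, f], _ =>
      simp [pvCommonMiddle, PySem.List.slice, PySem.Set.ofList, PySem.Set.empty,
            PySem.Set.add, PySem.Set.contains, PySem.Set.inter,
            PySem.List.pyGetD, PySem.List.pyGet?, PySem.List.pyIdx?]
      by_cases hbe : b = e <;> simp [hbe, List.filter]

theorem pvPairCheck_eq (paths : List (List String)) (h : ∀ p ∈ paths, p.length = 3) :
    pvPairCheck paths = decide (paths.map (fun p => PySem.List.pyGetD p 1 "")).Nodup := by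
  induction paths with
  | nil => simp [pvPairCheck]
  | cons p rest ih =>
    have hp : p.length = 3 := h p (by simp)
    have hrest : ∀ q ∈ rest, q.length = 3 := fun q hq => h q (by simp [hq])
    have hany : (rest.any (fun q => pvCommonMiddle p q)) =
        decide (PySem.List.pyGetD p 1 "" ∈ rest.map (fun q => PySem.List.pyGetD q 1 "")) := by
      by_cases hm : PySem.List.pyGetD p 1 "" ∈ rest.map (fun q => PySem.List.pyGetD q 1 "")
      · simp only [hm, decide_true]
        obtain ⟨q, hq, hqe⟩ := List.mem_map.mp hm
        exact List.any_eq_true.mpr ⟨q, hq, by rw [pvCommonMiddle_eq p q hp (hrest q hq)]; simp [hqe]⟩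
      · simp only [hm, decide_false]
        refine List.any_eq_false.mpr ?_
        intro q hq hce
        rw [pvCommonMiddle_eq p q hp (hrest q hq)] at hce
        exact hm (List.mem_map.mpr ⟨q, hq, (beq_iff_eq.mp hce).symm⟩)
    simp only [pvPairCheck, hany, List.map_cons, List.nodup_cons]
    by_cases hm : PySem.List.pyGetD p 1 "" ∈ rest.map (fun q => PySem.List.pyGetD q 1 "")
    · simp [hm]
    · simp [hm, ih hrest]

-- A's two guards (all lengths equal, common length 3) say: every path has length 3
theorem pvGuard_eq (paths : List (List String)) (hne : paths ≠ []) :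
    ((PySem.Set.ofList (paths.map (fun p => PySem.List.len p))).length = 1 ∧
      PySem.List.pyGetD (paths.map (fun p => PySem.List.len p)) 0 0 = 3) ↔
    (∀ p ∈ paths, PySem.List.len p = 3) := by
  obtain ⟨p0, rest, rfl⟩ : ∃ p0 rest, paths = p0 :: rest := by
    cases paths with
    | nil => exact absurd rfl hne
    | cons a t => exact ⟨a, t, rfl⟩
  set l := (p0 :: rest).map (fun p => PySem.List.len p) with hl
  have hhd : PySem.List.pyGetD l 0 0 = PySem.List.len p0 := by
    simp [hl, PySem.List.pyGetD, PySem.List.pyGet?, PySem.List.pyIdx?]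
  constructor
  · rintro ⟨h1, h3⟩
    have hmem0 : PySem.List.len p0 ∈ PySem.Set.ofList l :=
      (PySem.Set.mem_ofList l _).mpr (by simp [hl])
    obtain ⟨b, hb⟩ : ∃ b, PySem.Set.ofList l = [b] := by
      cases hs : PySem.Set.ofList l with
      | nil => rw [hs] at h1; simp at h1
      | cons b t => rw [hs] at h1; simp at h1; exact ⟨b, by rw [h1]⟩
    have hball : ∀ x ∈ l, x = b := by
      intro x hx
      have := (PySem.Set.mem_ofList l x).mpr hx
      rw [hb] at this; simpa using this
    have hb3 : b = 3 := by
      have := hball _ (by simp [hl] : PySem.List.len p0 ∈ l)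
      rw [hhd] at h3; omega
    intro p hp
    have : PySem.List.len p ∈ l := by
      simp only [hl, List.mem_map]; exact ⟨p, hp, rfl⟩
    exact (hball _ this).trans hb3
  · intro hall
    have hall' : ∀ x ∈ l, x = 3 := by
      intro x hx
      simp only [hl, List.mem_map] at hx
      obtain ⟨p, hp, rfl⟩ := hx
      exact hall p hp
    constructor
    · have hmem : (3 : Int) ∈ PySem.Set.ofList l := by
        refine (PySem.Set.mem_ofList l 3).mpr ?_
        have : PySem.List.len p0 ∈ l := by simp [hl]
        rw [hall' _ this] at this; exact this
      have hsubs : ∀ x ∈ PySem.Set.ofList l, x = 3 := by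
        intro x hx; exact hall' x ((PySem.Set.mem_ofList l x).mp hx)
      have hnd := PySem.Set.nodup_ofList l
      cases hs : PySem.Set.ofList l with
      | nil => rw [hs] at hmem; simp at hmem
      | cons b t =>
        rw [hs] at hsubs hnd
        cases t with
        | nil => simp
        | cons c u =>
          have hb := hsubs b (by simp)
          have hc := hsubs c (by simp)
          rw [List.nodup_cons] at hnd
          exact absurd (by simp [hb, hc]) hnd.1
    · rw [hhd]; exact hall p0 (by simp)

-- ===== VERDICT (by name: the statement is the Claim_ definition above) =====
theorem is_pure_parallel_by_paths_py_spec : Claim_equal_is_pure_parallel_by_paths_py := by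
  intro paths start end_ _
  unfold Spec_is_pure_parallel_by_paths_py
  unfold is_pure_parallel_by_paths_py is_pure_parallel_by_paths_py_alt
  by_cases hlt : paths.length < 2
  · simp [hlt]
  · simp only [hlt, if_false]
    have hne : paths ≠ [] := by intro h; rw [h] at hlt; simp at hlt
    by_cases hall : ∀ p ∈ paths, PySem.List.len p = 3
    · have hg := (pvGuard_eq paths hne).mpr hall
      have hanyf : (paths.any (fun p => decide (PySem.List.len p ≠ 3))) = false := by
        simp only [List.any_eq_false]; intro p hp
        have h3 : (p.length : Int) = 3 := by simpa [PySem.List.len] using hall p hp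
        simp [PySem.List.len, h3]
      have hall3 : ∀ p ∈ paths, p.length = 3 := by
        intro p hp; have := hall p hp; simp [PySem.List.len] at this; omega
      rw [if_neg (fun h => h hg.1), if_neg (fun h => h hg.2), hanyf]
      simp only [Bool.false_eq_true, if_false]
      rw [pvPairCheck_eq paths hall3]
      by_cases hnd : (paths.map (fun p => PySem.List.pyGetD p 1 "")).Nodup
      · simp [hnd, (pv_ofList_len_iff _).mpr hnd]
      · have hne' := (pv_ofList_len_iff (paths.map (fun p => PySem.List.pyGetD p 1 ""))).not.mpr hnd
        simp [hnd]
        simpa using hne'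
    · have hanyt : (paths.any (fun p => decide (PySem.List.len p ≠ 3))) = true := by
        push_neg at hall
        obtain ⟨p, hp, hp3⟩ := hall
        exact List.any_eq_true.mpr ⟨p, hp, by simpa [PySem.List.len] using hp3⟩
      have hgn := fun hg => hall ((pvGuard_eq paths hne).mp hg)
      simp only [hanyt, if_true]
      by_cases h1 : (PySem.Set.ofList (paths.map (fun p => PySem.List.len p))).length = 1
      · have h3 : PySem.List.pyGetD (paths.map (fun p => PySem.List.len p)) 0 0 ≠ 3 := by
          intro h3; exact hgn ⟨h1, h3⟩
        rw [if_neg (fun h => h h1), if_pos h3]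
      · rw [if_pos h1]
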